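-- pv_equiv track=rewrite | github.com/G-A-Shelley/CodeSamples | AmazonCodeChallenge/PredictDays.py | predictDays
-- ===== SOURCE A (Python) =====
-- def predictDays(day, k):
--   # day = integer array of predicted rainfall values
--   # k   = integer target number of days from the considered day
--
--   # return and array of ideal days where index 0 is day 1
--   # non increaasing rainfall for k days
--   # non decresing for k days after
--
--   size      = len(day)  # number of days to evaluate
--   idealDays = list()    # list of days to be returned
--   check     = 0         # number of valied days checked per day
--
--   # iterate through the days from k to size minus k
--   for i in (range(k,size-k)):
--     check = 0   # reset the chak value to zero for each new day
--     # determine if for the current day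
--     # day before and after are greater than equal
--     if day[i-1] >= day[i] and day[i] <= day[i+1]:
--       # iterate though the days before and after the current day by 1
--       for j in range(k):
--         # determine is the preceding days are decreasing or equal
--         # determine if the days after are increasing or equal
--         if day[i-j-1] >= day[i-j] and day[i+j] <= day[i+j+1]:
--           check+=1  # increment the check days counter
--         else:
--           break # if the check of days does not meet criteria break the loop
--
--     #determine if the check days is equal to the ideal day
--     if check == k:
--       idealDays.append(i+1) # add the curretn day to the ideal days list
--
--   # return the list of ideal days
--   return(idealDays)
-- ===== SOURCE B (Python) =====
-- def _runs(day):
--     # runs[i] = number of consecutive non-increasing steps ending at i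
--     runs = []
--     prev = 0
--     for i in range(len(day)):
--         prev = prev + 1 if i > 0 and day[i - 1] >= day[i] else 0
--         runs.append(prev)
--     return runs
--
--
-- def predictDays(day, k):
--     down = _runs(day)
--     up = list(reversed(_runs(list(reversed(day)))))
--     return [i + 1 for i in range(len(day)) if down[i] >= k and up[i] >= k]
-- ===== Notes on version B (the rewrite author's own statement) =====
-- stated objective: alternative
-- what changed: A rescans up to k neighbouring steps for every candidate day; B precomputes non-increasing/non-decreasing run lengths in two linear passes (the second as the reversed first pass) and selects the days whose both run lengths reach k.
import Mathlib
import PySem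

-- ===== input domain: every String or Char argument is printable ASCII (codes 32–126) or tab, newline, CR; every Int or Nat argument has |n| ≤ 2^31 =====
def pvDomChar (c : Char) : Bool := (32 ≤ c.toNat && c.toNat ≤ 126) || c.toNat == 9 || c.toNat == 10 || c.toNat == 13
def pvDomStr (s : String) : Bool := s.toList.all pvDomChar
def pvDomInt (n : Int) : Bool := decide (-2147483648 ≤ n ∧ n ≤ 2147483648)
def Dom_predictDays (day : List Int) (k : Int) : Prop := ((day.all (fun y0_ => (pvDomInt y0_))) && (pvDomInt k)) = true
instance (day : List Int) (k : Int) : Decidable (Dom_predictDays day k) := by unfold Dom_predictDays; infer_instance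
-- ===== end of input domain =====

-- B replaces A's per-day rescan of the k neighbouring steps by two run-length passes
-- (down/up), then keeps the days whose both run lengths reach k (objective: alternative).

-- ===== PORT A =====
-- day[i] (Python indexing); Python raises where pyGet? is none; such inputs are excluded by
-- Pre_, so the .getD 0 default is never the value the claim is about.
def pvG (day : List Int) (i : Int) : Int := (PySem.List.pyGet? day i).getD 0

-- A's inner 'for j in range(k): … else: break' loop, carrying the running 'check'
def pvCheckLoop (day : List Int) (i : Int) (j : Nat) (fuel : Nat) (check : Int) : Int :=
  match fuel with
  | 0 => check
  | f + 1 =>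
    if pvG day (i - (j : Int) - 1) ≥ pvG day (i - (j : Int)) ∧
       pvG day (i + (j : Int)) ≤ pvG day (i + (j : Int) + 1) then
      pvCheckLoop day i (j + 1) f (check + 1)
    else check

-- the body of A's outer loop computing 'check' for day i
def pvCheck (day : List Int) (k : Int) (i : Int) : Int :=
  if pvG day (i - 1) ≥ pvG day i ∧ pvG day i ≤ pvG day (i + 1) then
    pvCheckLoop day i 0 k.toNat 0
  else 0

def predictDays (day : List Int) (k : Int) : List Int :=
  (PySem.List.pyRange k ((day.length : Int) - k) 1).foldl
    (fun acc i => if pvCheck day k i = k then acc ++ [i + 1] else acc) []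

-- ===== PORT B =====
-- runs[i] = number of consecutive non-increasing steps ending at i (Source B's _runs)
def pvRuns (day : List Int) : List Int :=
  ((List.range day.length).foldl
    (fun (st : Int × List Int) i =>
      let prev := if 0 < i ∧ day.getD (i - 1) 0 ≥ day.getD i 0 then st.1 + 1 else 0
      (prev, st.2 ++ [prev])) (0, [])).2

def predictDays_alt (day : List Int) (k : Int) : List Int :=
  let down := pvRuns day
  let up := (pvRuns day.reverse).reverse
  (List.range day.length).filterMap
    (fun i => if down.getD i 0 ≥ k ∧ up.getD i 0 ≥ k then some ((i : Int) + 1) else none)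

-- ===== PRECONDITION & SPEC =====
-- Exactly the inputs on which Python A returns: for k < 0 it always raises IndexError, and for
-- k = 0 it raises unless the list is empty or its last step is strictly rising (it evaluates
-- day[len(day)] whenever day[-2] >= day[-1]); Pre_ excludes no input on which A returns.
def Pre_predictDays (day : List Int) (k : Int) : Prop :=
  1 ≤ k ∨ (k = 0 ∧ (day = [] ∨ (2 ≤ day.length ∧
    day.getD (day.length - 2) 0 < day.getD (day.length - 1) 0)))
instance (day : List Int) (k : Int) : Decidable (Pre_predictDays day k) := by
  unfold Pre_predictDays; infer_instance

def pvWitness_predictDays : List Int × Int := ([3, 2, 1, 2, 3], 2)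

def Spec_predictDays (day : List Int) (k : Int) (out : List Int) : Prop := out = predictDays_alt day k
instance (day : List Int) (k : Int) (out : List Int) : Decidable (Spec_predictDays day k out) := by unfold Spec_predictDays; infer_instance

-- ===== CLAIM (what is proved, stated in full; the proofs are below) =====
def Claim_equal_predictDays : Prop := ∀ (day : List Int) (k : Int), Dom_predictDays day k → Pre_predictDays day k → Spec_predictDays day k (predictDays day k)


-- ===== LEMMAS AND PROOFS =====

-- B's run-length recurrence, as a function of the position
def pvDv (day : List Int) : Nat → Int
  | 0 => 0
  | m + 1 => if day.getD m 0 ≥ day.getD (m + 1) 0 then pvDv day m + 1 else 0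

theorem pvDv_nonneg (day : List Int) (m : Nat) : 0 ≤ pvDv day m := by
  induction m with
  | zero => simp [pvDv]
  | succ m ih => simp only [pvDv]; split <;> omega

theorem pvRuns_aux (day : List Int) (m : Nat) :
    (List.range m).foldl
      (fun (st : Int × List Int) i =>
        let prev := if 0 < i ∧ day.getD (i - 1) 0 ≥ day.getD i 0 then st.1 + 1 else 0
        (prev, st.2 ++ [prev])) (0, []) =
    ((match m with | 0 => (0 : Int) | t + 1 => pvDv day t), (List.range m).map (pvDv day)) := by
  induction m with
  | zero => simp
  | succ m ih =>
    rw [List.range_succ, List.foldl_append, ih]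
    simp only [List.foldl_cons, List.foldl_nil, List.map_append, List.map_cons, List.map_nil]
    cases m with
    | zero => simp [pvDv]
    | succ t =>
      have h1 : 0 < t + 1 := Nat.succ_pos t
      simp only [pvDv, Nat.add_sub_cancel]
      simp [h1]

theorem pvRuns_eq (day : List Int) : pvRuns day = (List.range day.length).map (pvDv day) := by
  unfold pvRuns
  rw [pvRuns_aux]

theorem pvRuns_length (day : List Int) : (pvRuns day).length = day.length := by
  rw [pvRuns_eq]; simp

-- the run length reaches k iff the previous k steps are non-increasing
theorem pvDv_ge_iff (day : List Int) (k : Nat) : ∀ (m : Nat),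
    ((k : Int) ≤ pvDv day m ↔ k ≤ m ∧ ∀ j < k, day.getD (m - j) 0 ≤ day.getD (m - j - 1) 0) := by
  induction k with
  | zero => intro m; simpa using pvDv_nonneg day m
  | succ k ih =>
    intro m
    cases m with
    | zero =>
      simp only [pvDv]
      constructor
      · intro h; exfalso; omega
      · rintro ⟨h, -⟩; omega
    | succ s =>
      simp only [pvDv]
      split
      case isTrue hc =>
        constructor
        · intro h
          have hk : (k : Int) ≤ pvDv day s := by omega
          obtain ⟨h1, h2⟩ := (ih s).1 hk
          refine ⟨by omega, ?_⟩
          intro j hj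
          cases j with
          | zero => simpa using hc
          | succ j =>
            simpa using h2 j (by omega)
        · rintro ⟨h1, h2⟩
          have : (k : Int) ≤ pvDv day s := by
            refine (ih s).2 ⟨by omega, fun j hj => ?_⟩
            simpa using h2 (j + 1) (by omega)
          omega
      case isFalse hc =>
        constructor
        · intro h; exfalso; omega
        · rintro ⟨h1, h2⟩
          exfalso
          have h0 := h2 0 (by omega)
          simp only [Nat.sub_zero] at h0
          exact hc h0

theorem pvGetD_reverse (l : List Int) (m : Nat) (h : m < l.length) :
    l.reverse.getD m 0 = l.getD (l.length - 1 - m) 0 := by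
  rw [List.getD_eq_getElem _ _ (by simpa using h), List.getD_eq_getElem _ _ (by omega)]
  simp [List.getElem_reverse]

-- the condition A's inner loop checks at offset t from day i
def pvGoodI (day : List Int) (i : Int) (t : Nat) : Prop :=
  pvG day (i - (t : Int) - 1) ≥ pvG day (i - (t : Int)) ∧
  pvG day (i + (t : Int)) ≤ pvG day (i + (t : Int) + 1)

theorem pvCheckLoop_le (day : List Int) (i : Int) (f : Nat) : ∀ (j : Nat) (c : Int),
    pvCheckLoop day i j f c ≤ c + f := by
  induction f with
  | zero => intro j c; simp [pvCheckLoop]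
  | succ f ih =>
    intro j c
    simp only [pvCheckLoop]
    split
    · have := ih (j + 1) (c + 1); push_cast at *; omega
    · push_cast; omega

theorem pvCheckLoop_eq_iff (day : List Int) (i : Int) (f : Nat) : ∀ (j : Nat) (c : Int),
    (pvCheckLoop day i j f c = c + f ↔ ∀ t < f, pvGoodI day i (j + t)) := by
  induction f with
  | zero => intro j c; simp [pvCheckLoop]
  | succ f ih =>
    intro j c
    simp only [pvCheckLoop]
    split
    case isTrue hc =>
      rw [show (c + ((f : Nat) + 1 : Nat) : Int) = (c + 1) + f by push_cast; ring]
      rw [ih (j + 1) (c + 1)]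
      constructor
      · intro h t ht
        cases t with
        | zero => simpa [pvGoodI] using hc
        | succ t =>
          rw [show j + (t + 1) = j + 1 + t by omega]
          exact h t (by omega)
      · intro h t ht
        rw [show j + 1 + t = j + (t + 1) by omega]
        exact h (t + 1) (by omega)
    case isFalse hc =>
      constructor
      · intro h; exfalso; push_cast at h; omega
      · intro h
        exfalso
        exact hc (by simpa [pvGoodI] using h 0 (by omega))

theorem pvG_natCast (day : List Int) (t : Nat) : pvG day (t : Int) = day.getD t 0 := by
  simp [pvG, PySem.List.pyGet?_natCast, List.getD_eq_getElem?_getD]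

-- pvCheck hits k exactly when all k offsets are good (for 1 ≤ k)
theorem pvCheck_eq_iff (day : List Int) (k : Int) (i : Int) (hk : 1 ≤ k) :
    (pvCheck day k i = k ↔ ∀ t < k.toNat, pvGoodI day i t) := by
  unfold pvCheck
  split
  case isTrue hc =>
    have hle := pvCheckLoop_le day i k.toNat 0 0
    have hiff := pvCheckLoop_eq_iff day i k.toNat 0 0
    simp only [zero_add] at hle hiff
    constructor
    · intro h
      have : pvCheckLoop day i 0 k.toNat 0 = (k.toNat : Int) := by omega
      exact fun t ht => (hiff.1 this) t ht
    · intro h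
      have : pvCheckLoop day i 0 k.toNat 0 = (k.toNat : Int) := hiff.2 (by simpa using h)
      omega
  case isFalse hc =>
    constructor
    · intro h; exfalso; omega
    · intro h
      exfalso
      have h0 := h 0 (by omega)
      simp only [pvGoodI, Nat.cast_zero, sub_zero, add_zero] at h0
      exact hc h0

-- filterMap of an if-some-else-none is map-of-filter
theorem pvFilterMap_if {α β : Type} (l : List α) (p : α → Prop) [DecidablePred p] (f : α → β) :
    l.filterMap (fun a => if p a then some (f a) else none) =
      (l.filter (fun a => decide (p a))).map f := by
  induction l with
  | nil => rfl
  | cons x xs ih =>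
    by_cases hx : p x <;> simp [hx, ih]

-- the window shape: a filterMap over range n whose condition forces k' ≤ m < n - k'
theorem pvWindow (n k' : Nat) (C : Nat → Prop) [DecidablePred C] (g : Nat → Int)
    (hC : ∀ m, C m → k' ≤ m ∧ m + k' + 1 ≤ n) :
    (List.range n).filterMap (fun m => if C m then some (g m) else none) =
      ((List.range (n - (k' + k'))).filterMap
        (fun t => if C (k' + t) then some (g (k' + t)) else none)) := by
  rcases Nat.lt_or_ge n k' with hkn' | hkn
  · have h0 : n - (k' + k') = 0 := by omega
    rw [h0]
    simp only [List.range_zero, List.filterMap_nil]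
    apply List.filterMap_eq_nil_iff.mpr
    intro m hm
    have : m < n := List.mem_range.mp hm
    have : ¬ C m := fun h => by have := (hC m h).1; omega
    simp [this]
  · conv_lhs => rw [show n = k' + (n - k') by omega, List.range_add]
    rw [List.filterMap_append]
    have hnil : (List.range k').filterMap (fun m => if C m then some (g m) else none) = [] := by
      apply List.filterMap_eq_nil_iff.mpr
      intro m hm
      have : m < k' := List.mem_range.mp hm
      have : ¬ C m := fun h => by have := (hC m h).1; omega
      simp [this]
    rw [hnil, List.nil_append, List.filterMap_map]
    conv_lhs => rw [show n - k' = (n - (k' + k')) + ((n - k') - (n - (k' + k'))) by omega,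
      List.range_add]
    rw [List.filterMap_append, List.filterMap_map]
    have hnil2 : (List.range ((n - k') - (n - (k' + k')))).filterMap
        (((fun m => if C m then some (g m) else none) ∘ fun x => k' + x) ∘
          fun x => (n - (k' + k')) + x) = [] := by
      apply List.filterMap_eq_nil_iff.mpr
      intro s hs
      simp only [Function.comp_apply]
      have : ¬ C (k' + ((n - (k' + k')) + s)) := fun h => by have := (hC _ h).2; omega
      simp [this]
    rw [hnil2, List.append_nil]
    exact List.filterMap_congr fun t _ => rfl

theorem pvGoodI_natCast (day : List Int) (m s : Nat) (hs : s < m) :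
    (pvGoodI day (m : Int) s ↔
      day.getD (m - s) 0 ≤ day.getD (m - s - 1) 0 ∧
      day.getD (m + s) 0 ≤ day.getD (m + s + 1) 0) := by
  unfold pvGoodI
  rw [show ((m : Int) - (s : Int) - 1) = ((m - s - 1 : Nat) : Int) by omega,
      show ((m : Int) - (s : Int)) = ((m - s : Nat) : Int) by omega,
      show ((m : Int) + (s : Int) + 1) = ((m + s + 1 : Nat) : Int) by omega,
      show ((m : Int) + (s : Int)) = ((m + s : Nat) : Int) by omega,
      pvG_natCast, pvG_natCast, pvG_natCast, pvG_natCast]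

-- the selection condition, written over positions and steps
abbrev pvC (day : List Int) (k' : Nat) (m : Nat) : Prop :=
  (k' ≤ m ∧ ∀ j < k', day.getD (m - j) 0 ≤ day.getD (m - j - 1) 0) ∧
  (m + k' + 1 ≤ day.length ∧ ∀ j < k', day.getD (m + j) 0 ≤ day.getD (m + j + 1) 0)

theorem pvRuns_getD_nonneg (day : List Int) (i : Nat) : 0 ≤ (pvRuns day).getD i 0 := by
  rw [pvRuns_eq]
  by_cases h : i < day.length
  · rw [List.getD_eq_getElem _ _ (by simpa using h)]
    simp [pvDv_nonneg]
  · rw [List.getD_eq_default _ _ (by simpa using h)]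

theorem predictDays_spec : Claim_equal_predictDays := by
  intro day k _hdom hpre
  unfold Spec_predictDays predictDays predictDays_alt
  rcases hpre with hk | ⟨hk0, -⟩
  · -- main case: 1 ≤ k
    obtain ⟨k', rfl⟩ : ∃ k' : Nat, k = (k' : Int) := ⟨k.toNat, by omega⟩
    have hk1 : 1 ≤ k' := by exact_mod_cast hk
    dsimp only
    rw [show (fun (acc : List Int) i => if pvCheck day (k' : Int) i = (k' : Int) then acc ++ [i + 1] else acc) =
          (fun acc i => if decide (pvCheck day (k' : Int) i = (k' : Int)) = true then acc ++ [i + 1] else acc) by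
        funext acc i; simp only [decide_eq_true_eq]]
    rw [PySem.List.foldl_append_if, List.nil_append, PySem.List.pyRange_one,
        List.filter_map, List.map_map]
    have hBc : ∀ m ∈ List.range day.length,
        (if (pvRuns day).getD m 0 ≥ (k' : Int) ∧
            ((pvRuns day.reverse).reverse).getD m 0 ≥ (k' : Int) then
          some ((m : Int) + 1) else none) =
        (if pvC day k' m then some ((m : Int) + 1) else none) := by
      intro m hm
      have hmn : m < day.length := List.mem_range.mp hm
      refine if_congr ?_ rfl rfl
      have hdown : (pvRuns day).getD m 0 = pvDv day m := by
        rw [pvRuns_eq, List.getD_eq_getElem _ _ (by simpa using hmn)]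
        simp
      have hlen : (pvRuns day.reverse).length = day.length := by
        rw [pvRuns_length, List.length_reverse]
      have hups : ((pvRuns day.reverse).reverse).getD m 0 =
          pvDv day.reverse (day.length - 1 - m) := by
        rw [pvGetD_reverse _ _ (by rw [hlen]; exact hmn), hlen, pvRuns_eq,
            List.getD_eq_getElem _ _ (by simp; omega)]
        simp
      rw [ge_iff_le, ge_iff_le, hdown, hups, pvDv_ge_iff, pvDv_ge_iff]
      have hrl : day.reverse.length = day.length := List.length_reverse
      constructor
      · rintro ⟨⟨hd1, hd2⟩, ⟨hu1, hu2⟩⟩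
        refine ⟨⟨hd1, hd2⟩, ⟨by omega, fun j hj => ?_⟩⟩
        have := hu2 j hj
        rw [pvGetD_reverse day _ (by omega), pvGetD_reverse day _ (by omega)] at this
        rwa [show day.length - 1 - (day.length - 1 - m - j) = m + j by omega,
             show day.length - 1 - (day.length - 1 - m - j - 1) = m + j + 1 by omega] at this
      · rintro ⟨⟨hd1, hd2⟩, ⟨hu1, hu2⟩⟩
        refine ⟨⟨hd1, hd2⟩, ⟨by omega, fun j hj => ?_⟩⟩
        rw [pvGetD_reverse day _ (by omega), pvGetD_reverse day _ (by omega),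
            show day.length - 1 - (day.length - 1 - m - j) = m + j by omega,
            show day.length - 1 - (day.length - 1 - m - j - 1) = m + j + 1 by omega]
        exact hu2 j hj
    rw [List.filterMap_congr hBc,
        pvWindow day.length k' (pvC day k') (fun m => (m : Int) + 1)
          (fun m hm => ⟨hm.1.1, hm.2.1⟩),
        pvFilterMap_if,
        show (((day.length : Int) - k') - k').toNat = day.length - (k' + k') by omega]
    have hfil : ∀ t ∈ List.range (day.length - (k' + k')),
        decide (pvCheck day (k' : Int) ((k' : Int) + (t : Int)) = (k' : Int)) =
        decide (pvC day k' (k' + t)) := by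
      intro t ht
      have htM : t < day.length - (k' + k') := List.mem_range.mp ht
      apply decide_eq_decide.mpr
      rw [pvCheck_eq_iff day _ _ hk, show ((k' : Int) + (t : Int)) = ((k' + t : Nat) : Int) by omega]
      simp only [Int.toNat_natCast]
      constructor
      · intro h
        refine ⟨⟨by omega, fun j hj => ?_⟩, ⟨by omega, fun j hj => ?_⟩⟩
        · exact ((pvGoodI_natCast day (k' + t) j (by omega)).1 (h j hj)).1
        · exact ((pvGoodI_natCast day (k' + t) j (by omega)).1 (h j hj)).2
      · rintro ⟨⟨-, hd⟩, ⟨-, hu⟩⟩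
        intro j hj
        exact (pvGoodI_natCast day (k' + t) j (by omega)).2 ⟨hd j hj, hu j hj⟩
    simp only [Function.comp_def]
    rw [List.filter_congr hfil]
    apply List.map_congr_left
    intro t ht
    push_cast
    ring
  · -- degenerate case k = 0: A keeps every day, and B's run lengths are nonnegative
    subst hk0
    have hchk : ∀ i, pvCheck day 0 i = 0 := by
      intro i
      unfold pvCheck
      split <;> rfl
    dsimp only
    rw [show (fun (acc : List Int) i => if pvCheck day 0 i = 0 then acc ++ [i + 1] else acc) =
          (fun acc i => if decide (pvCheck day 0 i = 0) = true then acc ++ [i + 1] else acc) by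
        funext acc i; simp only [decide_eq_true_eq]]
    rw [PySem.List.foldl_append_if, List.nil_append, PySem.List.pyRange_one, pvFilterMap_if]
    have hAt : ∀ i : Int, decide (pvCheck day 0 i = 0) = true := fun i => by simp [hchk]
    have hBt : ∀ i : Nat, decide ((pvRuns day).getD i 0 ≥ (0 : Int) ∧
        ((pvRuns day.reverse).reverse).getD i 0 ≥ (0 : Int)) = true := by
      intro i
      refine decide_eq_true ⟨pvRuns_getD_nonneg day i, ?_⟩
      by_cases h : i < (pvRuns day.reverse).length
      · rw [pvGetD_reverse _ _ h]
        exact pvRuns_getD_nonneg day.reverse _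
      · rw [List.getD_eq_default _ _ (by rw [List.length_reverse]; omega)]
    simp only [hAt, hBt, List.filter_true]
    rw [show (((day.length : Int) - 0) - 0).toNat = day.length by omega, List.map_map]
    apply List.map_congr_left
    intro t ht
    simp only [Function.comp]
    ring
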